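-- pv_equiv track=rewrite | github.com/SeungWoo-You/PS | 프로그래머스/unrated/172927. 광물 캐기/광물 캐기.py | solution
-- ===== SOURCE A (Python) =====
-- import heapq
--
-- def solution(picks, minerals):
--     answer = 0
--     gp = [minerals[5 * i:5 * (i + 1)] for i in range(min(len(minerals) // 5 + 1, sum(picks)))]
--     weight: list[int] = []
--     for G in gp:
--         temp = 0
--         for ore in G:
--             if ore == 'diamond':
--                 temp += 25
--             elif ore == 'iron':
--                 temp += 5
--             else:
--                 temp += 1
--         weight.append(temp)
--     H = [(-w, g) for w, g in zip(weight, gp)]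
--     heapq.heapify(H)
--     for _ in range(picks[0]):
--         if not H:
--             return answer
--         _, G = heapq.heappop(H)
--         answer += len(G)
--     for _ in range(picks[1]):
--         if not H:
--             return answer
--         _, G = heapq.heappop(H)
--         for ore in G:
--             if ore == 'diamond':
--                 answer += 5
--             else:
--                 answer += 1
--     for _ in range(picks[2]):
--         if not H:
--             return answer
--         w, _ = heapq.heappop(H)
--         answer -= w
--     return answer
-- ===== SOURCE B (Python) =====
-- def solution(picks, minerals):
--     n = min(len(minerals) // 5 + 1, sum(picks))
--     groups = [minerals[5 * i:5 * (i + 1)] for i in range(n)]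
--     pairs = sorted((-sum(25 if o == 'diamond' else 5 if o == 'iron' else 1 for o in g), g)
--                    for g in groups)
--     t1 = max(picks[0], 0)
--     t2 = t1 + max(picks[1], 0)
--     t3 = t2 + max(picks[2], 0)
--     answer = 0
--     for i, (negw, g) in enumerate(pairs):
--         if i < t1:
--             answer += len(g)
--         elif i < t2:
--             answer += sum(5 if o == 'diamond' else 1 for o in g)
--         elif i < t3:
--             answer -= negw
--         else:
--             break
--     return answer
-- ===== Notes on version B (the rewrite author's own statement) =====
-- stated objective: simpler
-- what changed: Replaces the heapify + three heappop loops with one full sort of the (-weight, group) pairs (same tuple tie-break) and a single indexed walk that picks each group's score by which pick tier its rank falls in, stopping when picks are spent.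
-- outside the precondition, e.g. on solution([2], ['stone']): A returns 1, B raises IndexError
import Mathlib
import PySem

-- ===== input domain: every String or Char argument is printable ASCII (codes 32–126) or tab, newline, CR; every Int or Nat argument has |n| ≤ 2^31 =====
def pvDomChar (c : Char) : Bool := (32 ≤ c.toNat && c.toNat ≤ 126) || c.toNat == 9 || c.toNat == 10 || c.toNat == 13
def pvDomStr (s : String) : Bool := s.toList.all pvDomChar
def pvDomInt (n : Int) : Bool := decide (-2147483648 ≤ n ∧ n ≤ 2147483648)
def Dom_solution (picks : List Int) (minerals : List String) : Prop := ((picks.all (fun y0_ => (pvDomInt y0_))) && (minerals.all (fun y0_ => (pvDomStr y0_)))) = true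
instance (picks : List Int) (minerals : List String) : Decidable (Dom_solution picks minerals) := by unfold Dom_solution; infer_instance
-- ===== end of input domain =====

-- B replaces the heapify + three heappop loops by one full sort of the (-weight, group)
-- pairs and a single indexed walk over it (objective: simpler). Return value only; no mutation.

-- ===== PORT A =====
-- Python tuple order on the heap entries (-w, G): lexicographic on (Int, list of str).
def pvKey (p : Int × List String) : Lex (Int × List String) := toLex p

-- Model of heapq.heappop on a heapified list: returns the minimum tuple under Python's
-- tuple order and the remaining elements (exact at value level: CPython's internal heap
-- layout never affects the popped values, ties being equal tuples).
def pvPop? (H : List (Int × List String)) :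
    Option ((Int × List String) × List (Int × List String)) :=
  match PySem.List.min? H pvKey with
  | none => none            -- heap empty: 'if not H' fires
  | some m => some (m, H.erase m)

-- first loop: for _ in range(picks[0]): if not H: return answer; answer += len(G)
def pvTier1 : Nat → List (Int × List String) → Int →
    Sum Int (List (Int × List String) × Int)
  | 0, H, ans => .inr (H, ans)
  | n + 1, H, ans =>
    match pvPop? H with
    | none => .inl ans
    | some (p, H') => pvTier1 n H' (ans + (p.2.length : Int))

-- second loop: for ore in G: answer += 5 if diamond else 1
def pvTier2 : Nat → List (Int × List String) → Int →
    Sum Int (List (Int × List String) × Int)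
  | 0, H, ans => .inr (H, ans)
  | n + 1, H, ans =>
    match pvPop? H with
    | none => .inl ans
    | some (p, H') =>
        pvTier2 n H'
          (p.2.foldl (fun a ore => if ore = "diamond" then a + 5 else a + 1) ans)

-- third loop: answer -= w  (w is the stored negative weight)
def pvTier3 : Nat → List (Int × List String) → Int →
    Sum Int (List (Int × List String) × Int)
  | 0, H, ans => .inr (H, ans)
  | n + 1, H, ans =>
    match pvPop? H with
    | none => .inl ans
    | some (p, H') => pvTier3 n H' (ans - p.1)

def pvRun3 (n3 : Nat) (H : List (Int × List String)) (ans : Int) : Int :=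
  match pvTier3 n3 H ans with
  | .inl a => a
  | .inr (_, a) => a

def pvRun23 (n2 n3 : Nat) (H : List (Int × List String)) (ans : Int) : Int :=
  match pvTier2 n2 H ans with
  | .inl a => a
  | .inr (H2, a2) => pvRun3 n3 H2 a2

def pvRun123 (n1 n2 n3 : Nat) (H : List (Int × List String)) (ans : Int) : Int :=
  match pvTier1 n1 H ans with
  | .inl a => a
  | .inr (H1, a1) => pvRun23 n2 n3 H1 a1

def solution (picks : List Int) (minerals : List String) : Int :=
  let gp := (PySem.List.pyRange 0 (min (PySem.Int.floordiv (minerals.length : Int) 5 + 1) picks.sum) 1).map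
      (fun i => PySem.List.slice minerals (some (5 * i)) (some (5 * (i + 1))))
  let weight := gp.foldl
      (fun acc G => acc ++ [G.foldl
        (fun temp ore => if ore = "diamond" then temp + 25
          else if ore = "iron" then temp + 5 else temp + 1) (0 : Int)]) []
  let H := (weight.zip gp).map (fun wg => (-wg.1, wg.2))
  -- heapq.heapify(H): in-place reordering, value-level content unchanged
  pvRun123 (PySem.List.pyGetD picks 0 0).toNat (PySem.List.pyGetD picks 1 0).toNat
    (PySem.List.pyGetD picks 2 0).toNat H 0

-- ===== PORT B =====
def pvWeight (g : List String) : Int :=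
  (g.map (fun o => if o = "diamond" then (25 : Int)
    else if o = "iron" then 5 else 1)).sum

-- walk the fully sorted pairs with one index; tier by rank against cumulative pick counts
def pvWalk (t1 t2 t3 : Int) : Int → List (Int × List String) → Int → Int
  | _, [], ans => ans
  | i, p :: rest, ans =>
    if i < t1 then pvWalk t1 t2 t3 (i + 1) rest (ans + (p.2.length : Int))
    else if i < t2 then
      pvWalk t1 t2 t3 (i + 1) rest
        (ans + (p.2.map (fun o => if o = "diamond" then (5 : Int) else 1)).sum)
    else if i < t3 then pvWalk t1 t2 t3 (i + 1) rest (ans - p.1)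
    else ans

def solution_alt (picks : List Int) (minerals : List String) : Int :=
  let n := min (PySem.Int.floordiv (minerals.length : Int) 5 + 1) picks.sum
  let groups := (PySem.List.pyRange 0 n 1).map
      (fun i => PySem.List.slice minerals (some (5 * i)) (some (5 * (i + 1))))
  let pairs := PySem.List.sorted (groups.map (fun g => (-(pvWeight g), g))) pvKey false
  let t1 := max (PySem.List.pyGetD picks 0 0) 0
  let t2 := t1 + max (PySem.List.pyGetD picks 1 0) 0
  let t3 := t2 + max (PySem.List.pyGetD picks 2 0) 0
  pvWalk t1 t2 t3 0 pairs 0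

-- ===== PRECONDITION & SPEC =====
-- Pre_ excludes picks lists shorter than 3: there A's unguarded picks[0..2] indexing can
-- raise IndexError (it returns only when the heap happens to empty first), and B always raises.
def Pre_solution (picks : List Int) (minerals : List String) : Prop := 3 ≤ picks.length
instance (picks : List Int) (minerals : List String) : Decidable (Pre_solution picks minerals) := by
  unfold Pre_solution; infer_instance

def pvWitness_solution : List Int × List String :=
  ([1, 1, 1], ["diamond", "iron", "stone", "stone", "iron", "diamond"])

def Spec_solution (picks : List Int) (minerals : List String) (out : Int) : Prop :=
  out = solution_alt picks minerals
instance (picks : List Int) (minerals : List String) (out : Int) :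
    Decidable (Spec_solution picks minerals out) := by unfold Spec_solution; infer_instance

-- ===== CLAIM (what is proved, stated in full; the proofs are below) =====
def Claim_equal_solution : Prop := ∀ (picks : List Int) (minerals : List String),
  Dom_solution picks minerals → Pre_solution picks minerals →
    Spec_solution picks minerals (solution picks minerals)

-- ===== LEMMAS AND PROOFS =====

theorem pvKey_injective : Function.Injective pvKey := fun _ _ h => h

-- popping the minimum is taking the head of the sorted list
theorem sorted_eq_cons_of_min {H : List (Int × List String)} {m : Int × List String}
    (h : PySem.List.min? H pvKey = some m) :
    PySem.List.sorted H pvKey = m :: PySem.List.sorted (H.erase m) pvKey := by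
  apply PySem.List.eq_of_perm_of_pairwise_le_of_injective pvKey pvKey_injective
  · exact (PySem.List.sorted_perm H pvKey false).trans
      ((List.perm_cons_erase (PySem.List.min?_mem h)).trans
        (List.Perm.cons m (PySem.List.sorted_perm (H.erase m) pvKey false).symm))
  · exact PySem.List.sorted_pairwise H pvKey
  · refine List.Pairwise.cons ?_ (PySem.List.sorted_pairwise (H.erase m) pvKey)
    intro y hy
    exact PySem.List.min?_isMin h y
      (List.mem_of_mem_erase ((PySem.List.sorted_perm (H.erase m) pvKey false).mem_iff.mp hy))

theorem pvPop?_none {H : List (Int × List String)} (h : pvPop? H = none) :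
    PySem.List.sorted H pvKey = [] := by
  unfold pvPop? at h
  rcases hm : PySem.List.min? H pvKey with _ | m
  · rw [(PySem.List.min?_eq_none_iff H pvKey).mp hm]; rfl
  · rw [hm] at h; simp at h

theorem pvPop?_some {H H' : List (Int × List String)} {p : Int × List String}
    (h : pvPop? H = some (p, H')) :
    PySem.List.sorted H pvKey = p :: PySem.List.sorted H' pvKey := by
  unfold pvPop? at h
  rcases hm : PySem.List.min? H pvKey with _ | m
  · rw [hm] at h; simp at h
  · rw [hm] at h
    simp only [Option.some.injEq, Prod.mk.injEq] at h
    rw [← h.1, ← h.2]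
    exact sorted_eq_cons_of_min hm

theorem fold2_eq (g : List String) (ans : Int) :
    g.foldl (fun a ore => if ore = "diamond" then a + 5 else a + 1) ans =
      ans + (g.map (fun o => if o = "diamond" then (5 : Int) else 1)).sum := by
  have : (fun (a : Int) (ore : String) => if ore = "diamond" then a + 5 else a + 1) =
      (fun a ore => a + (if ore = "diamond" then (5 : Int) else 1)) := by
    funext a o; by_cases h : o = "diamond" <;> simp [h]
  rw [this, PySem.List.foldl_add]

theorem foldw_eq (G : List String) :
    G.foldl (fun temp ore => if ore = "diamond" then temp + 25
      else if ore = "iron" then temp + 5 else temp + 1) (0 : Int) = pvWeight G := by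
  have : (fun (temp : Int) (ore : String) => if ore = "diamond" then temp + 25
      else if ore = "iron" then temp + 5 else temp + 1) =
      (fun temp ore => temp + (if ore = "diamond" then (25 : Int)
        else if ore = "iron" then 5 else 1)) := by
    funext a o; by_cases h : o = "diamond" <;> by_cases h' : o = "iron" <;> simp [h, h']
  rw [this, PySem.List.foldl_add, pvWeight]; ring

theorem run3_eq_walk (t1 t2 t3 : Int) (n : Nat)
    (H : List (Int × List String)) (ans i : Int)
    (h1 : t1 ≤ i) (h2 : t2 ≤ i) (h3 : i + (n : Int) = t3) :
    pvRun3 n H ans = pvWalk t1 t2 t3 i (PySem.List.sorted H pvKey) ans := by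
  induction n generalizing H ans i with
  | zero =>
    rcases hs : PySem.List.sorted H pvKey with _ | ⟨p, rest⟩
    · simp [pvRun3, pvTier3, pvWalk]
    · simp only [pvRun3, pvTier3, pvWalk]
      rw [if_neg (by omega), if_neg (by omega), if_neg (by omega)]
  | succ n ih =>
    rcases hp : pvPop? H with _ | ⟨p, H'⟩
    · rw [pvPop?_none hp]; simp [pvRun3, pvTier3, hp, pvWalk]
    · rw [pvPop?_some hp]
      simp only [pvRun3, pvTier3, hp, pvWalk]
      rw [if_neg (by omega), if_neg (by omega), if_pos (by push_cast at h3 ⊢; omega)]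
      exact ih H' (ans - p.1) (i + 1) (by omega) (by omega) (by push_cast at h3 ⊢; omega)

theorem run23_eq_walk (t1 t2 t3 : Int) (n2 n3 : Nat)
    (H : List (Int × List String)) (ans i : Int)
    (h1 : t1 ≤ i) (h2 : i + (n2 : Int) = t2) (h3 : t2 + (n3 : Int) = t3) :
    pvRun23 n2 n3 H ans = pvWalk t1 t2 t3 i (PySem.List.sorted H pvKey) ans := by
  induction n2 generalizing H ans i with
  | zero =>
    simp only [pvRun23, pvTier2]
    exact run3_eq_walk t1 t2 t3 n3 H ans i (by omega) (by omega) (by omega)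
  | succ n ih =>
    rcases hp : pvPop? H with _ | ⟨p, H'⟩
    · rw [pvPop?_none hp]; simp [pvRun23, pvTier2, hp, pvWalk]
    · rw [pvPop?_some hp]
      simp only [pvRun23, pvTier2, hp, pvWalk]
      rw [if_neg (by omega), if_pos (by push_cast at h2 ⊢; omega), fold2_eq]
      exact ih H' _ (i + 1) (by omega) (by push_cast at h2 ⊢; omega)

theorem run123_eq_walk (t1 t2 t3 : Int) (n1 n2 n3 : Nat)
    (H : List (Int × List String)) (ans i : Int)
    (h1 : i + (n1 : Int) = t1) (h2 : t1 + (n2 : Int) = t2) (h3 : t2 + (n3 : Int) = t3) :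
    pvRun123 n1 n2 n3 H ans = pvWalk t1 t2 t3 i (PySem.List.sorted H pvKey) ans := by
  induction n1 generalizing H ans i with
  | zero =>
    simp only [pvRun123, pvTier1]
    exact run23_eq_walk t1 t2 t3 n2 n3 H ans i (by omega) (by omega) (by omega)
  | succ n ih =>
    rcases hp : pvPop? H with _ | ⟨p, H'⟩
    · rw [pvPop?_none hp]; simp [pvRun123, pvTier1, hp, pvWalk]
    · rw [pvPop?_some hp]
      simp only [pvRun123, pvTier1, hp, pvWalk]
      rw [if_pos (by push_cast at h1 ⊢; omega)]
      exact ih H' _ (i + 1) (by push_cast at h1 ⊢; omega)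

-- ===== VERDICT (by name: the statement is the Claim_ definition above) =====
theorem solution_spec : Claim_equal_solution := by
  intro picks minerals _ _
  unfold Spec_solution solution solution_alt
  simp only []
  set gp := (PySem.List.pyRange 0 (min (PySem.Int.floordiv (minerals.length : Int) 5 + 1) picks.sum) 1).map
      (fun i => PySem.List.slice minerals (some (5 * i)) (some (5 * (i + 1)))) with hgp
  have hw : gp.foldl
      (fun acc G => acc ++ [G.foldl
        (fun temp ore => if ore = "diamond" then temp + 25
          else if ore = "iron" then temp + 5 else temp + 1) (0 : Int)]) [] =
      gp.map pvWeight := by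
    rw [PySem.List.foldl_append_singleton_eq_map]
    simp [foldw_eq]
  rw [hw]
  have hz : ((gp.map pvWeight).zip gp).map (fun wg => (-wg.1, wg.2)) =
      gp.map (fun g => (-(pvWeight g), g)) := by
    have h := @List.zip_map' _ _ _ pvWeight id gp
    simp only [List.map_id] at h
    rw [h, List.map_map]
    rfl
  rw [hz]
  exact run123_eq_walk (max (PySem.List.pyGetD picks 0 0) 0)
    (max (PySem.List.pyGetD picks 0 0) 0 + max (PySem.List.pyGetD picks 1 0) 0)
    (max (PySem.List.pyGetD picks 0 0) 0 + max (PySem.List.pyGetD picks 1 0) 0 +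
      max (PySem.List.pyGetD picks 2 0) 0)
    _ _ _ _ 0 0
    (by simp) (by simp) (by simp)
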